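-- pv_equiv track=rewrite | github.com/Cornell-Genomics-Facility/phased_primers | app.py | _cg_violation_html
-- ===== SOURCE A (Python) =====
-- def _cg_violation_html(seq: str) -> str:
--     """Return an HTML error if 'CCCC' or any 5-long C/G-only run exists; else empty string."""
--     s = (seq or "").upper()
--     if ("AAAA" in s) or ("CCCC" in s) or ("TTTT" in s) or ("GGGG" in s):
--         return "<div style='color:#b00020'>❌ Bases cannot appear four times in a row (e.g., no “CCCC”).</div>"
--     for i in range(len(s) - 4):
--         if all(ch in {"C", "G"} for ch in s[i:i+5]):
--             return "<div style='color:#b00020'>❌ No 5-base runs composed only of C/G (e.g., “CGCGC”, “CCCGG”).</div>"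
--     return ""
-- ===== SOURCE B (Python) =====
-- def _cg_violation_html(seq: str) -> str:
--     """Return an HTML error if 'CCCC' or any 5-long C/G-only run exists; else empty string."""
--     s = (seq or "").upper()
--     if ("AAAA" in s) or ("CCCC" in s) or ("TTTT" in s) or ("GGGG" in s):
--         return "<div style='color:#b00020'>\u274c Bases cannot appear four times in a row (e.g., no \u201cCCCC\u201d).</div>"
--     run = 0
--     for ch in s:
--         run = run + 1 if ch in ("C", "G") else 0
--         if run == 5:
--             return "<div style='color:#b00020'>\u274c No 5-base runs composed only of C/G (e.g., \u201cCGCGC\u201d, \u201cCCCGG\u201d).</div>"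
--     return ""
-- ===== Notes on version B (the rewrite author's own statement) =====
-- stated objective: simpler
-- what changed: Keeps the four-in-a-row guard and replaces the index loop that slices a 5-character window and set-checks it at every position with a single pass over the characters maintaining a running count of consecutive C/G bases, returning the moment the count reaches 5.
import Mathlib
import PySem

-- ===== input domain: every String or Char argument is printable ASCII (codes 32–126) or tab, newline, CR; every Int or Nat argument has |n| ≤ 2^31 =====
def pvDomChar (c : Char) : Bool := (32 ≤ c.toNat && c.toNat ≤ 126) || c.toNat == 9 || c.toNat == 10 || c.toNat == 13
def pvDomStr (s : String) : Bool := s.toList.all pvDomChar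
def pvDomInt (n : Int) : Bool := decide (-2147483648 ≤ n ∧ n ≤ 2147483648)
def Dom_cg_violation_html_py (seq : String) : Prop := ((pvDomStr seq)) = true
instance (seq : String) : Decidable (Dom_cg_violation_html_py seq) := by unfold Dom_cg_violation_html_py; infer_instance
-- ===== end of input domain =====

-- B replaces A's slice-a-5-window-and-set-check loop with a single pass keeping a running
-- count of consecutive C/G bases (objective: simpler).

-- ===== PORT A =====
def cgMsg4 : String := "<div style='color:#b00020'>❌ Bases cannot appear four times in a row (e.g., no “CCCC”).</div>"
def cgMsg5 : String := "<div style='color:#b00020'>❌ No 5-base runs composed only of C/G (e.g., “CGCGC”, “CCCGG”).</div>"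

-- the 'for i in range(len(s)-4): if all(ch in {"C","G"} for ch in s[i:i+5]): return msg5' loop,
-- early return as recursion over the index list
def cgWinLoop (s : List Char) : List Int → String
  | [] => ""
  | i :: rest =>
    if ((PySem.List.slice s (some i) (some (i + 5))).all (fun ch => ['C', 'G'].contains ch) : Bool) then
      cgMsg5
    else cgWinLoop s rest

def cg_violation_html_py (seq : String) : String :=
  -- (seq or "") equals seq for a str argument ("" or "" is "")
  let s : List Char := PySem.Chars.upper seq.toList
  if ((PySem.Chars.isIn "AAAA".toList s || PySem.Chars.isIn "CCCC".toList s
      || PySem.Chars.isIn "TTTT".toList s || PySem.Chars.isIn "GGGG".toList s) : Bool) then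
    cgMsg4
  else
    cgWinLoop s (PySem.List.pyRange 0 ((s.length : Int) - 4) 1)

-- ===== PORT B =====
-- single pass: run = length of the current consecutive C/G run, early return at 5
def cgRunLoop : List Char → Nat → String
  | [], _ => ""
  | c :: t, run =>
    let run' := if ((c == 'C' || c == 'G') : Bool) then run + 1 else 0
    if ((run' == 5) : Bool) then cgMsg5 else cgRunLoop t run'

def cg_violation_html_py_alt (seq : String) : String :=
  let s : List Char := PySem.Chars.upper seq.toList
  if ((PySem.Chars.isIn "AAAA".toList s || PySem.Chars.isIn "CCCC".toList s
      || PySem.Chars.isIn "TTTT".toList s || PySem.Chars.isIn "GGGG".toList s) : Bool) then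
    cgMsg4
  else
    cgRunLoop s 0

-- ===== PRECONDITION & SPEC =====
def Spec_cg_violation_html_py (seq : String) (out : String) : Prop := out = cg_violation_html_py_alt seq
instance (seq : String) (out : String) : Decidable (Spec_cg_violation_html_py seq out) := by unfold Spec_cg_violation_html_py; infer_instance

-- ===== CLAIM (what is proved, stated in full; the proofs are below) =====
def Claim_equal_cg_violation_html_py : Prop := ∀ (seq : String), Dom_cg_violation_html_py seq → Spec_cg_violation_html_py seq (cg_violation_html_py seq)

-- ===== LEMMAS AND PROOFS =====

-- is this character C or G
def cgChar (c : Char) : Bool := c == 'C' || c == 'G'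

-- do the first n characters exist and consist only of C/G
def cgPref : Nat → List Char → Bool
  | 0, _ => true
  | _ + 1, [] => false
  | n + 1, c :: t => cgChar c && cgPref n t

-- does some 5-character all-C/G window exist
def cgAnyWin : List Char → Bool
  | [] => false
  | c :: t => cgPref 5 (c :: t) || cgAnyWin t

theorem cgPref_mono {m n : Nat} (h : m ≤ n) : ∀ l, cgPref n l = true → cgPref m l = true := by
  induction m generalizing n with
  | zero => intro l _; rfl
  | succ m ih =>
    intro l hl
    cases n with
    | zero => omega
    | succ n =>
      cases l with
      | nil => simp [cgPref] at hl
      | cons c t =>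
        simp only [cgPref, Bool.and_eq_true] at hl ⊢
        exact ⟨hl.1, ih (by omega) t hl.2⟩

theorem cgPref_short {n : Nat} : ∀ l : List Char, l.length < n → cgPref n l = false := by
  induction n with
  | zero => intro l h; omega
  | succ n ih =>
    intro l h
    cases l with
    | nil => rfl
    | cons c t =>
      simp only [cgPref, Bool.and_eq_false_iff]
      right; exact ih t (by simp at h; omega)

theorem cgAnyWin_short : ∀ l : List Char, l.length < 5 → cgAnyWin l = false := by
  intro l
  induction l with
  | nil => intro _; rfl
  | cons c t ih =>
    intro h
    simp only [cgAnyWin, Bool.or_eq_false_iff]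
    exact ⟨cgPref_short _ (by simp at h ⊢; omega), ih (by simp at h; omega)⟩

theorem cgAnyWin_absorb {l : List Char} (h : cgPref 5 l = true) : cgAnyWin l = true := by
  cases l with
  | nil => simp [cgPref] at h
  | cons c t => simp [cgAnyWin, h]

theorem cgPref_eq_take : ∀ (n : Nat) (l : List Char), n ≤ l.length →
    ((l.take n).all cgChar) = cgPref n l := by
  intro n
  induction n with
  | zero => intro l _; rfl
  | succ n ih =>
    intro l h
    cases l with
    | nil => simp at h
    | cons c t =>
      simp only [List.take_succ_cons, List.all_cons, cgPref]
      rw [ih t (by simp at h; omega)]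

-- B's loop computed: counter k (k ≤ 4) of trailing C/G already seen
theorem cgRunLoop_eq : ∀ (l : List Char) (k : Nat), k ≤ 4 →
    cgRunLoop l k = (if (cgPref (5 - k) l || cgAnyWin l) = true then cgMsg5 else "") := by
  intro l
  induction l with
  | nil =>
    intro k hk
    have h0 : cgPref (5 - k) ([] : List Char) = false := cgPref_short _ (by simp; omega)
    simp [cgRunLoop, h0, cgAnyWin]
  | cons c t ih =>
    intro k hk
    cases hc : cgChar c with
    | true =>
      have hc' : (c == 'C' || c == 'G') = true := hc
      by_cases hk4 : k = 4
      · subst hk4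
        have h1 : cgPref (5 - 4) (c :: t) = true := by
          show cgPref 1 (c :: t) = true
          simp [cgPref, hc]
        simp [cgRunLoop, hc', h1]
      · have h45 : ((k + 1 == 5) : Bool) = false := by simp; omega
        have step : cgRunLoop (c :: t) k = cgRunLoop t (k + 1) := by
          simp [cgRunLoop, hc', h45]
        rw [step, ih (k + 1) (by omega)]
        have e1 : cgPref (5 - k) (c :: t) = cgPref (4 - k) t := by
          have hck : 5 - k = (4 - k) + 1 := by omega
          rw [hck]; simp [cgPref, hc]
        have e2 : cgAnyWin (c :: t) = (cgPref 4 t || cgAnyWin t) := by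
          show (cgPref 5 (c :: t) || cgAnyWin t) = _
          simp [cgPref, hc]
        have e3 : (5 - (k + 1)) = 4 - k := by omega
        rw [e1, e2, e3]
        congr 1
        cases h4 : cgPref 4 t with
        | false => simp
        | true =>
          have := cgPref_mono (m := 4 - k) (n := 4) (by omega) t h4
          simp [this]
    | false =>
      have hc' : (c == 'C' || c == 'G') = false := hc
      have step : cgRunLoop (c :: t) k = cgRunLoop t 0 := by
        simp [cgRunLoop, hc']
      rw [step, ih 0 (by omega)]
      have e1 : cgPref (5 - k) (c :: t) = false := by
        have hck : 5 - k = (4 - k) + 1 := by omega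
        rw [hck]; simp [cgPref, hc]
      have e2 : cgAnyWin (c :: t) = cgAnyWin t := by
        show (cgPref 5 (c :: t) || cgAnyWin t) = _
        simp [cgPref, hc]
      rw [e1, e2]
      simp only [Bool.false_or]
      congr 1
      cases h5 : cgPref 5 t with
      | false => simp
      | true => simp [cgAnyWin_absorb h5]

-- A's early-return loop is 'any' over the index list
theorem cgWinLoop_eq_any : ∀ (s : List Char) (r : List Int),
    cgWinLoop s r = (if r.any (fun i => (PySem.List.slice s (some i) (some (i + 5))).all
        (fun ch => ['C', 'G'].contains ch)) = true then cgMsg5 else "") := by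
  intro s r
  induction r with
  | nil => simp [cgWinLoop]
  | cons i rest ih =>
    simp only [cgWinLoop, List.any_cons]
    by_cases hP : ((PySem.List.slice s (some i) (some (i + 5))).all (fun ch => ['C', 'G'].contains ch)) = true
    · rw [if_pos hP]; simp only [hP]; simp
    · have hF : ((PySem.List.slice s (some i) (some (i + 5))).all (fun ch => ['C', 'G'].contains ch)) = false := by
        cases hbe : ((PySem.List.slice s (some i) (some (i + 5))).all (fun ch => ['C', 'G'].contains ch)) with
        | true => exact absurd hbe hP
        | false => rfl
      rw [if_neg hP, ih]; simp only [hF]; simp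

theorem cg_contains_eq : (fun ch => (['C', 'G'] : List Char).contains ch) = cgChar := by
  funext ch
  simp only [cgChar, List.contains_cons, List.contains_nil, Bool.or_false]

-- the window 'any' over range(len-4) equals cgAnyWin
theorem cgAny_eq : ∀ (s : List Char),
    ((List.range (s.length - 4)).any (fun k => ((s.drop k).take 5).all cgChar)) = cgAnyWin s := by
  intro s
  induction s with
  | nil => rfl
  | cons c t ih =>
    by_cases hlen : t.length < 4
    · have h1 : (c :: t).length - 4 = 0 := by simp; omega
      rw [h1]
      have h2 : cgAnyWin (c :: t) = false := cgAnyWin_short _ (by simp; omega)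
      simp [h2]
    · have hlen' : 4 ≤ t.length := Nat.le_of_not_lt hlen
      have h1 : (c :: t).length - 4 = (t.length - 4) + 1 := by simp; omega
      rw [h1, List.range_succ_eq_map]
      simp only [List.any_cons, List.any_map]
      have hB : (List.range (t.length - 4)).any
            ((fun k => (((c :: t).drop k).take 5).all cgChar) ∘ Nat.succ)
          = (List.range (t.length - 4)).any (fun k => ((t.drop k).take 5).all cgChar) :=
        List.any_congr rfl (fun k => rfl)
      rw [hB, ih]
      simp only [List.drop_zero]
      rw [cgPref_eq_take 5 (c :: t) (by simp; omega)]
      rfl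

-- both loops agree from counter 0
theorem loops_eq (s : List Char) :
    cgWinLoop s (PySem.List.pyRange 0 ((s.length : Int) - 4) 1) = cgRunLoop s 0 := by
  rw [cgWinLoop_eq_any, cgRunLoop_eq s 0 (by omega)]
  have hrange : PySem.List.pyRange 0 ((s.length : Int) - 4) 1
      = (List.range (s.length - 4)).map (fun k : Nat => (k : Int)) := by
    rw [PySem.List.pyRange_one]
    have h1 : (((s.length : Int) - 4) - 0).toNat = s.length - 4 := by omega
    rw [h1]
    exact List.map_congr_left (fun k _ => by omega)
  rw [hrange, List.any_map]
  have harg : (List.range (s.length - 4)).any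
        ((fun i => (PySem.List.slice s (some i) (some (i + 5))).all
          (fun ch => ['C', 'G'].contains ch)) ∘ (fun k : Nat => (k : Int)))
      = (List.range (s.length - 4)).any (fun k => ((s.drop k).take 5).all cgChar) := by
    apply List.any_congr rfl
    intro k
    show (PySem.List.slice s (some (k : Int)) (some ((k : Int) + 5))).all _ = _
    rw [cg_contains_eq]
    have h5 : ((k : Int) + 5) = ((k : Int) + ((5 : Nat) : Int)) := by norm_num
    rw [h5, PySem.List.slice_natCast_add]
  rw [harg, cgAny_eq]
  have h50 : (5 - 0 : Nat) = 5 := rfl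
  rw [h50]
  congr 1
  cases h5 : cgPref 5 s with
  | false => simp
  | true => simp [cgAnyWin_absorb h5]

-- ===== VERDICT (by name: the statement is the Claim_ definition above) =====
theorem cg_violation_html_py_spec : Claim_equal_cg_violation_html_py := by
  intro seq _
  unfold Spec_cg_violation_html_py cg_violation_html_py cg_violation_html_py_alt
  cases hg : (PySem.Chars.isIn "AAAA".toList (PySem.Chars.upper seq.toList)
      || PySem.Chars.isIn "CCCC".toList (PySem.Chars.upper seq.toList)
      || PySem.Chars.isIn "TTTT".toList (PySem.Chars.upper seq.toList)
      || PySem.Chars.isIn "GGGG".toList (PySem.Chars.upper seq.toList)) with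
  | true => simp only [hg, if_true]
  | false =>
    simp only [hg, Bool.false_eq_true, if_false]
    exact loops_eq _
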